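-- pv_equiv track=rewrite | github.com/Yuyi-hao/python_dsa_book_sol | chap1/creativity/c_1_14.py | is_odd_product
-- ===== SOURCE A (Python) =====
-- def is_odd_product(data) -> None:
--     curr = 0
--     for i in data:
--         if i&1 and not curr:
--             curr = i
--         elif i&1 and curr and curr != i:
--             return True
--     return False
-- ===== SOURCE B (Python) =====
-- def is_odd_product(data) -> None:
--     return len({i for i in data if i & 1}) > 1
-- ===== Notes on version B (the rewrite author's own statement) =====
-- stated objective: simpler
-- what changed: Replaces A's stateful scan (first-odd sentinel, two-way branch, early return) with a closed-form one-liner: build the set of odd values with a set comprehension and test whether its cardinality exceeds 1.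
import Mathlib
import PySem

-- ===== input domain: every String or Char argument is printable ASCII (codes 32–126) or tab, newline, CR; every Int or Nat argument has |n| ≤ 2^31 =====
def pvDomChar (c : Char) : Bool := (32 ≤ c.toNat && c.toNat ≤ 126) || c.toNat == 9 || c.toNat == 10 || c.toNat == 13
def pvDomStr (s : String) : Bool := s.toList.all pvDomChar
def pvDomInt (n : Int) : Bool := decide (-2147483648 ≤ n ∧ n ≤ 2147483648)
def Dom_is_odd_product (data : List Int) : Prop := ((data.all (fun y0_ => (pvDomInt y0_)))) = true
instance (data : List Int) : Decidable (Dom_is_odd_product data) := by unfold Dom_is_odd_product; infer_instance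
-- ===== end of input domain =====

-- B replaces A's stateful early-return scan with a set comprehension of the odd values plus a cardinality test; return values proved equal.
-- ===== PORT A =====
-- 'i & 1' is PySem.Int.band i 1; Python truthiness of it is 'band i 1 ≠ 0'.
def isOddProdGoA (curr : Int) : List Int → Bool
  | [] => false
  | i :: rest =>
    if PySem.Int.band i 1 != 0 && curr == 0 then isOddProdGoA i rest
    else if PySem.Int.band i 1 != 0 && curr != 0 && curr != i then true
    else isOddProdGoA curr rest

def is_odd_product (data : List Int) : Bool := isOddProdGoA 0 data

-- ===== PORT B =====
-- '{i for i in data if i & 1}' is PySem.Set.ofList of the filtered list; 'len(...) > 1' is the cardinality test.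
def is_odd_product_alt (data : List Int) : Bool :=
  decide (1 < PySem.Set.len (PySem.Set.ofList (data.filter (fun i => PySem.Int.band i 1 != 0))))

-- ===== PRECONDITION & SPEC =====
def Spec_is_odd_product (data : List Int) (out : Bool) : Prop := out = is_odd_product_alt data
instance (data : List Int) (out : Bool) : Decidable (Spec_is_odd_product data out) := by unfold Spec_is_odd_product; infer_instance

-- ===== CLAIM (what is proved, stated in full; the proofs are below) =====
def Claim_equal_is_odd_product : Prop := ∀ (data : List Int), Dom_is_odd_product data → Spec_is_odd_product data (is_odd_product data)

-- ===== LEMMAS AND PROOFS =====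

-- foldl add never shrinks the set: length is monotone.
theorem length_le_foldl_add (l : List Int) : ∀ s : PySem.Set Int,
    s.length ≤ (l.foldl PySem.Set.add s).length := by
  induction l with
  | nil => intro s; simp
  | cons x l ih =>
    intro s
    refine le_trans ?_ (ih (PySem.Set.add s x))
    simp [PySem.Set.add]
    split <;> simp

-- Starting from the singleton {c}, the accumulated set exceeds size 1 iff some element differs from c.
theorem foldl_add_singleton_big (l : List Int) : ∀ c : Int,
    (decide (1 < (l.foldl PySem.Set.add [c]).length)) = l.any (fun x => x != c) := by
  induction l with
  | nil => intro c; simp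
  | cons x l ih =>
    intro c
    by_cases hx : x = c
    · subst hx
      simp [PySem.Set.add, PySem.Set.contains, ih]
    · have h2 : 2 ≤ (l.foldl PySem.Set.add [c, x]).length := by
        simpa using length_le_foldl_add l [c, x]
      have hxne : (x != c) = true := by simp [hx]
      simp [PySem.Set.add, PySem.Set.contains, List.foldl, hx, hxne]
      omega

-- With an odd value c already recorded, A's loop scans for any odd element different from c.
theorem goA_odd (l : List Int) : ∀ c : Int, PySem.Int.band c 1 ≠ 0 →
    isOddProdGoA c l = l.any (fun x => PySem.Int.band x 1 != 0 && x != c) := by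
  induction l with
  | nil => intro c _; rfl
  | cons i rest ih =>
    intro c hc
    have hc0 : c ≠ 0 := by
      intro h; subst h; simp [PySem.Int.band] at hc
    by_cases hodd : PySem.Int.band i 1 = 0
    · simp [isOddProdGoA, hodd, ih c hc]
    · by_cases hci : c = i
      · subst hci
        simp [isOddProdGoA, hodd, hc0, ih c hc]
      · have hic : i ≠ c := fun h => hci h.symm
        simp [isOddProdGoA, hodd, hc0, hci, hic]

-- Main equality, by induction on the list.
theorem goA_eq (data : List Int) : isOddProdGoA 0 data =
    decide (1 < ((data.filter (fun i => PySem.Int.band i 1 != 0)).foldl PySem.Set.add ([] : PySem.Set Int)).length) := by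
  induction data with
  | nil => rfl
  | cons i rest ih =>
    by_cases hodd : PySem.Int.band i 1 = 0
    · simpa [isOddProdGoA, List.filter_cons, hodd] using ih
    · have hi0 : i ≠ 0 := by intro h; subst h; simp [PySem.Int.band] at hodd
      have h1 : isOddProdGoA 0 (i :: rest) = isOddProdGoA i rest := by
        simp [isOddProdGoA, hodd]
      rw [h1, goA_odd rest i hodd]
      have h2 : PySem.Set.add ([] : PySem.Set Int) i = [i] := rfl
      simp only [List.filter_cons, if_pos (by simp [hodd] : (PySem.Int.band i 1 != 0) = true), List.foldl_cons, h2]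
      rw [foldl_add_singleton_big, List.any_filter]

-- Bridge B's Int-valued Set.len to the list length used above.
theorem alt_eq_len (data : List Int) : is_odd_product_alt data =
    decide (1 < ((data.filter (fun i => PySem.Int.band i 1 != 0)).foldl PySem.Set.add ([] : PySem.Set Int)).length) := by
  simp [is_odd_product_alt, PySem.Set.len, PySem.Set.ofList]

-- ===== VERDICT (by name: the statement is the Claim_ definition above) =====
theorem is_odd_product_spec : Claim_equal_is_odd_product := by
  intro data _
  unfold Spec_is_odd_product is_odd_product
  rw [goA_eq, alt_eq_len]
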